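-- pv_equiv track=rewrite | github.com/faustinorizzi/placasGPT | appV2.py | parse_srcset_best
-- ===== SOURCE A (Python) =====
-- def parse_srcset_best(srcset: str) -> str:
--     if not srcset:
--         return ""
--     candidates = []
--     for part in srcset.split(","):
--         pieces = part.strip().split()
--         if not pieces:
--             continue
--         url = pieces[0]
--         width = 0
--         if len(pieces) > 1 and pieces[1].endswith("w"):
--             try:
--                 width = int(pieces[1][:-1])
--             except Exception:
--                 pass
--         candidates.append((width, url))
--     candidates.sort(key=lambda x: x[0], reverse=True)
--     return candidates[0][1] if candidates else ""
-- ===== SOURCE B (Python) =====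
-- def _candidate(part):
--     pieces = part.strip().split()
--     if not pieces:
--         return None
--     width = 0
--     if len(pieces) > 1 and pieces[1].endswith("w"):
--         try:
--             width = int(pieces[1][:-1])
--         except Exception:
--             pass
--     return (width, pieces[0])
--
--
-- def parse_srcset_best(srcset: str) -> str:
--     best = None
--     for part in srcset.split(","):
--         c = _candidate(part)
--         if c is not None and (best is None or c[0] > best[0]):
--             best = c
--     return "" if best is None else best[1]
-- ===== Notes on version B (the rewrite author's own statement) =====
-- stated objective: simpler
-- what changed: Replaces collecting all candidates into a list and stable reverse-sorting it with a single pass keeping one running best (strict '>' so the first width-maximal candidate wins, matching the stable sort).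
import Mathlib
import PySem

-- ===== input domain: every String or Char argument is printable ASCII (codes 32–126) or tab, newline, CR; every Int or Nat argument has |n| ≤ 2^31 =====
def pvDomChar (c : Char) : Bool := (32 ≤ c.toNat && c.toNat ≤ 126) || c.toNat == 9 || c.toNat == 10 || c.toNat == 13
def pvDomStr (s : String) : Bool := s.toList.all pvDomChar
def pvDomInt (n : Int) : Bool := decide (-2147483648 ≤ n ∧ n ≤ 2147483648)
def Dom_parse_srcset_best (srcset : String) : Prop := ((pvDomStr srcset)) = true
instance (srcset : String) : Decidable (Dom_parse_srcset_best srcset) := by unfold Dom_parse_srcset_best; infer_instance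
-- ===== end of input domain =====

-- B replaces A's collect-then-stable-reverse-sort by a single running-best scan (strict '>' keeps the first width-maximal candidate): simpler, same results.


-- shared per-part parsing (the body of both Pythons' loop over srcset.split(",")):
-- pieces = part.strip().split(); None if empty, else (width, pieces[0]) with width from 'NNw'
def pvParsePart (part : String) : Option (Int × String) :=
  match PySem.Str.split₀ (PySem.Str.strip part) with
  | [] => none
  | url :: rest =>
    let width : Int :=
      match rest with
      | [] => 0
      | p1 :: _ =>
        if PySem.Str.endswith p1 "w" then
          match PySem.Int.ofStr? (PySem.Str.slice p1 none (some (-1))) with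
          | some w => w
          | none => 0
        else 0
    some (width, url)

-- ===== PORT A =====
def parse_srcset_best (srcset : String) : String :=
  if srcset = "" then ""
  else
    let candidates : List (Int × String) :=
      ((PySem.Str.split? srcset ",").getD []).foldl
        (fun acc part =>
          match pvParsePart part with
          | none => acc
          | some c => acc ++ [c]) []
    match PySem.List.sorted candidates (fun x => x.1) true with
    | [] => ""
    | c :: _ => c.2

-- ===== PORT B =====
def parse_srcset_best_alt (srcset : String) : String :=
  let best : Option (Int × String) :=
    ((PySem.Str.split? srcset ",").getD []).foldl
      (fun best part =>
        match pvParsePart part with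
        | none => best
        | some c =>
          match best with
          | none => some c
          | some b => if b.1 < c.1 then some c else some b) none
  match best with
  | none => ""
  | some b => b.2

-- ===== PRECONDITION & SPEC =====
def Spec_parse_srcset_best (srcset : String) (out : String) : Prop := out = parse_srcset_best_alt srcset
instance (srcset : String) (out : String) : Decidable (Spec_parse_srcset_best srcset out) := by unfold Spec_parse_srcset_best; infer_instance

-- ===== CLAIM (what is proved, stated in full; the proofs are below) =====
def Claim_equal_parse_srcset_best : Prop := ∀ (srcset : String), Dom_parse_srcset_best srcset → Spec_parse_srcset_best srcset (parse_srcset_best srcset)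

-- ===== LEMMAS AND PROOFS =====

-- B's running-best step, over an already-parsed candidate
def pvBestStep (best : Option (Int × String)) (c : Int × String) : Option (Int × String) :=
  match best with
  | none => some c
  | some b => if b.1 < c.1 then some c else some b

-- A's candidate-collecting fold is filterMap
theorem pvCollect_eq_filterMap (parts : List String) (acc : List (Int × String)) :
    parts.foldl (fun acc part =>
      match pvParsePart part with
      | none => acc
      | some c => acc ++ [c]) acc = acc ++ parts.filterMap pvParsePart := by
  induction parts generalizing acc with
  | nil => simp
  | cons p ps ih =>
    simp only [List.foldl_cons, List.filterMap_cons]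
    cases pvParsePart p with
    | none => simpa using ih acc
    | some c => simp [ih]

-- B's fold over parts is the fold of pvBestStep over the parsed candidates
theorem pvScan_eq_filterMap (parts : List String) (best : Option (Int × String)) :
    parts.foldl (fun best part =>
      match pvParsePart part with
      | none => best
      | some c => pvBestStep best c) best
    = (parts.filterMap pvParsePart).foldl pvBestStep best := by
  induction parts generalizing best with
  | nil => rfl
  | cons p ps ih =>
    simp only [List.foldl_cons, List.filterMap_cons]
    cases pvParsePart p with
    | none => exact ih best
    | some c => simp [ih]

-- core invariant: the head of the insertion-sorted (desc, stable) list tracks the running best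
theorem pvHead_foldl_insertBy (cs : List (Int × String)) (acc : List (Int × String))
    (best : Option (Int × String)) (hhead : acc.head? = best)
    (hmax : ∀ y ∈ acc, ∀ b ∈ best, y.1 ≤ b.1) :
    (cs.foldl (fun acc x =>
        PySem.List.insertBy (fun a b => decide (b.1 < a.1)) x acc) acc).head?
      = cs.foldl pvBestStep best
    ∧ ∀ y ∈ cs.foldl (fun acc x =>
        PySem.List.insertBy (fun a b => decide (b.1 < a.1)) x acc) acc,
        ∀ b ∈ cs.foldl pvBestStep best, y.1 ≤ b.1 := by
  induction cs generalizing acc best with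
  | nil => exact ⟨hhead, hmax⟩
  | cons x cs ih =>
    simp only [List.foldl_cons]
    cases acc with
    | nil =>
      cases best with
      | none =>
        exact ih [x] (some x) rfl (by simp)
      | some b => simp at hhead
    | cons a t =>
      cases best with
      | none => simp at hhead
      | some b =>
        have hb : a = b := by simpa using hhead
        subst hb
        by_cases hlt : a.1 < x.1
        · have : PySem.List.insertBy (fun a b => decide (b.1 < a.1)) x (a :: t)
              = x :: a :: t := by simp [PySem.List.insertBy, hlt]
          rw [this]
          have hstep : pvBestStep (some a) x = some x := by simp [pvBestStep, hlt]
          rw [hstep]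
          refine ih _ _ rfl ?_
          intro y hy b hb
          simp only [Option.mem_def, Option.some.injEq] at hb
          subst hb
          rcases List.mem_cons.mp hy with h | hy'
          · simp [h]
          · exact le_of_lt (lt_of_le_of_lt (hmax y hy' a rfl) hlt)
        · have : PySem.List.insertBy (fun a b => decide (b.1 < a.1)) x (a :: t)
              = a :: PySem.List.insertBy (fun a b => decide (b.1 < a.1)) x t := by
            simp [PySem.List.insertBy, hlt]
          rw [this]
          have hstep : pvBestStep (some a) x = some a := by simp [pvBestStep, hlt]
          rw [hstep]
          refine ih _ _ rfl ?_
          intro y hy b hb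
          simp only [Option.mem_def, Option.some.injEq] at hb
          subst hb
          rcases List.mem_cons.mp hy with h | hy'
          · simp [h]
          · rcases (PySem.List.mem_insertBy _ x y t).mp hy' with h | hy''
            · subst h; omega
            · exact hmax y (List.mem_cons_of_mem _ hy'') a rfl

theorem pvMain (cs : List (Int × String)) :
    (match PySem.List.sorted cs (fun x => x.1) true with
     | [] => ""
     | c :: _ => c.2)
    = (match cs.foldl pvBestStep none with
       | none => ""
       | some b => b.2) := by
  have h := (pvHead_foldl_insertBy cs [] none rfl (by simp)).1
  rw [PySem.List.sorted_rev_eq_foldl_insertBy]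
  cases hs : cs.foldl (fun acc x =>
      PySem.List.insertBy (fun a b => decide (b.1 < a.1)) x acc) [] with
  | nil => rw [hs] at h; simp at h; rw [← h]
  | cons c t => rw [hs] at h; simp at h; rw [← h]

-- ===== VERDICT (by name: the statement is the Claim_ definition above) =====
theorem parse_srcset_best_spec : Claim_equal_parse_srcset_best := by
  intro srcset _
  unfold Spec_parse_srcset_best parse_srcset_best parse_srcset_best_alt
  by_cases hs : srcset = ""
  · subst hs; decide
  · simp only [hs, if_false]
    have hfun : (fun (best : Option (Int × String)) (part : String) =>
        match pvParsePart part with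
        | none => best
        | some c =>
          match best with
          | none => some c
          | some b => if b.1 < c.1 then some c else some b)
        = (fun best part =>
            match pvParsePart part with
            | none => best
            | some c => pvBestStep best c) := by
      funext best part
      cases pvParsePart part with
      | none => rfl
      | some c => cases best with
        | none => rfl
        | some b => rfl
    rw [pvCollect_eq_filterMap, List.nil_append, hfun, pvScan_eq_filterMap]
    exact pvMain _
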